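-- pv_equiv track=rewrite | github.com/rezayadegari92/HLS_GENERATOR | hls_generator_v2.py | map_height_to_resolution
-- ===== SOURCE A (Python) =====
-- from typing import Dict, List, Optional, Tuple
--
-- def map_height_to_resolution(height: Optional[int], resolutions: List[int]) -> Optional[int]:
--     """Map video height to target resolution."""
--     if not resolutions:
--         return None
--     sorted_res = sorted(resolutions)
--     if height is None:
--         return sorted_res[-1]
--     candidates = [r for r in sorted_res if r <= height]
--     return candidates[-1] if candidates else sorted_res[0]
-- ===== SOURCE B (Python) =====
-- from typing import List, Optional
--
-- def map_height_to_resolution(height: Optional[int], resolutions: List[int]) -> Optional[int]: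
--     """Map video height to target resolution (single pass, no sorting)."""
--     if not resolutions:
--         return None
--     if height is None:
--         return max(resolutions)
--     best = None
--     lo = resolutions[0]
--     for r in resolutions:
--         if r <= height and (best is None or r > best):
--             best = r
--         if r < lo:
--             lo = r
--     return best if best is not None else lo
-- ===== Notes on version B (the rewrite author's own statement) =====
-- stated objective: faster
-- what changed: B replaces A's sort + filter-into-a-candidate-list with a single pass over the list that tracks the running maximum element <= height and the running minimum (and uses max() for the height=None case), eliminating the O(n log n) sort and the intermediate lists.
import Mathlib
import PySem

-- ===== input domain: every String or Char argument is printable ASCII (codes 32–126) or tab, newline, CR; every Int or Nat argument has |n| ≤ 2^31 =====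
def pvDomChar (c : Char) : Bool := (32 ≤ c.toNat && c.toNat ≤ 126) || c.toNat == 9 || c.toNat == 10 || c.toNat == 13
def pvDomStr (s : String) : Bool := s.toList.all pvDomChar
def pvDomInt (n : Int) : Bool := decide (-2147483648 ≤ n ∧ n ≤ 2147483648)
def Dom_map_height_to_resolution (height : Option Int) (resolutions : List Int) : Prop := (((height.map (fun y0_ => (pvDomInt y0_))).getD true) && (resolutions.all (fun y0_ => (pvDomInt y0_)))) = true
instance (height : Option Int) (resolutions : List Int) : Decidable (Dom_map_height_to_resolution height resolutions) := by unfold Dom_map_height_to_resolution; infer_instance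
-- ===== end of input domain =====

-- B replaces A's sort-then-filter scan by a single pass tracking the running max-below-height and min; equivalence of return values is proved for all inputs.

-- ===== PORT A =====
def map_height_to_resolution (height : Option Int) (resolutions : List Int) : Option Int :=
  if resolutions = [] then none
  else
    let sorted_res := PySem.List.sorted resolutions (fun x => x) false
    match height with
    | none => PySem.List.pyGet? sorted_res (-1)
    | some h =>
      let candidates := sorted_res.filter (fun r => decide (r ≤ h))
      if candidates ≠ [] then PySem.List.pyGet? candidates (-1)
      else PySem.List.pyGet? sorted_res 0

-- ===== PORT B =====
-- 'if r <= height and (best is None or r > best): best = r'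
def pvBestStep (h : Int) (b : Option Int) (r : Int) : Option Int :=
  match b with
  | none => if r ≤ h then some r else none
  | some w => if r ≤ h ∧ w < r then some r else some w

def map_height_to_resolution_alt (height : Option Int) (resolutions : List Int) : Option Int :=
  match resolutions with
  | [] => none
  | r0 :: _ =>
    match height with
    | none => PySem.List.max? resolutions (fun x => x)
    | some h =>
      let st := resolutions.foldl
        (fun (p : Option Int × Int) r => (pvBestStep h p.1 r, if r < p.2 then r else p.2))
        (none, r0)
      match st.1 with
      | some v => some v
      | none => some st.2

-- ===== PRECONDITION & SPEC =====
def Spec_map_height_to_resolution (height : Option Int) (resolutions : List Int) (out : Option Int) : Prop := out = map_height_to_resolution_alt height resolutions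
instance (height : Option Int) (resolutions : List Int) (out : Option Int) : Decidable (Spec_map_height_to_resolution height resolutions out) := by unfold Spec_map_height_to_resolution; infer_instance

-- ===== CLAIM (what is proved, stated in full; the proofs are below) =====
def Claim_equal_map_height_to_resolution : Prop := ∀ (height : Option Int) (resolutions : List Int), Dom_map_height_to_resolution height resolutions → Spec_map_height_to_resolution height resolutions (map_height_to_resolution height resolutions)

-- ===== LEMMAS AND PROOFS =====

-- split the paired fold of B into its two independent components
lemma pvFold_split (h : Int) (t : List Int) (b : Option Int) (lo : Int) :
    t.foldl (fun (p : Option Int × Int) r => (pvBestStep h p.1 r, if r < p.2 then r else p.2)) (b, lo)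
      = (t.foldl (pvBestStep h) b, t.foldl min lo) := by
  induction t generalizing b lo with
  | nil => rfl
  | cons r t ih =>
      simp only [List.foldl_cons, ih]
      congr 1
      rw [min_def]
      split_ifs <;> omega

-- the last element of a (·≤·)-pairwise list is an upper bound
lemma pvLast_is_max (s : List Int) (m : Int) (hp : s.Pairwise (· ≤ ·))
    (hm : s.getLast? = some m) : ∀ y ∈ s, y ≤ m := by
  rcases s.eq_nil_or_concat with rfl | ⟨t, z, rfl⟩
  · simp at hm
  · simp only [List.concat_eq_append] at hp hm ⊢
    rw [List.getLast?_concat] at hm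
    injection hm with e
    subst e
    intro y hy
    rcases List.mem_append.mp hy with hyt | hyz
    · exact (List.pairwise_append.mp hp).2.2 y hyt z (by simp)
    · simp at hyz; omega

-- specification of B's best-accumulator fold
lemma pvBest_spec (h : Int) : ∀ (t : List Int) (b : Option Int), (∀ w, b = some w → w ≤ h) →
    (t.foldl (pvBestStep h) b = none → b = none ∧ ∀ y ∈ t, ¬ y ≤ h)
    ∧ (∀ v, t.foldl (pvBestStep h) b = some v →
        (b = some v ∨ v ∈ t) ∧ v ≤ h ∧ (∀ y ∈ t, y ≤ h → y ≤ v) ∧ (∀ w, b = some w → w ≤ v)) := by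
  intro t
  induction t with
  | nil =>
      intro b hb
      refine ⟨fun hn => ⟨hn, by simp⟩, ?_⟩
      intro v hv
      simp only [List.foldl_nil] at hv
      exact ⟨Or.inl hv, hb v hv, by simp, fun w hw => by rw [hv] at hw; injection hw with e; omega⟩
  | cons r t ih =>
      intro b hb
      simp only [List.foldl_cons]
      have hb' : ∀ w, pvBestStep h b r = some w → w ≤ h := by
        intro w hw
        cases b with
        | none =>
            simp only [pvBestStep] at hw
            split at hw
            · injection hw with e; omega
            · exact absurd hw (by simp)
        | some u =>
            simp only [pvBestStep] at hw
            split at hw <;> (injection hw with e; subst e)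
            · omega
            · exact hb u rfl
      obtain ⟨IHn, IHs⟩ := ih (pvBestStep h b r) hb'
      constructor
      · intro hres
        obtain ⟨hstep, hnone⟩ := IHn hres
        cases b with
        | none =>
            simp only [pvBestStep] at hstep
            split at hstep
            · exact absurd hstep (by simp)
            · refine ⟨rfl, ?_⟩
              intro y hy
              rcases List.mem_cons.mp hy with rfl | hyt
              · assumption
              · exact hnone y hyt
        | some u =>
            simp only [pvBestStep] at hstep
            split at hstep <;> exact absurd hstep (by simp)
      · intro v hres
        obtain ⟨hmem, hvh, hub, hold⟩ := IHs v hres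
        refine ⟨?_, hvh, ?_, ?_⟩
        · rcases hmem with hstep | hvt
          · cases b with
            | none =>
                simp only [pvBestStep] at hstep
                split at hstep
                · right; injection hstep with e; exact List.mem_cons.mpr (Or.inl e.symm)
                · exact absurd hstep (by simp)
            | some u =>
                simp only [pvBestStep] at hstep
                split at hstep <;> injection hstep with e
                · right; exact List.mem_cons.mpr (Or.inl e.symm)
                · left; rw [e]
          · right; exact List.mem_cons.mpr (Or.inr hvt)
        · intro y hy hyh
          rcases List.mem_cons.mp hy with rfl | hyt
          · cases b with
            | none =>
                have : pvBestStep h none y = some y := by simp [pvBestStep, hyh]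
                exact hold y this
            | some u =>
                by_cases hur : u < y
                · have : pvBestStep h (some u) y = some y := by simp [pvBestStep, hyh, hur]
                  exact hold y this
                · have : pvBestStep h (some u) y = some u := by
                    simp only [pvBestStep]; rw [if_neg (by omega)]
                  exact le_trans (by omega) (hold u this)
          · exact hub y hyt hyh
        · intro w hw
          subst hw
          cases hstep : pvBestStep h (some w) r with
          | none => simp only [pvBestStep] at hstep; split at hstep <;> exact absurd hstep (by simp)
          | some u =>
              have hwu : w ≤ u := by
                simp only [pvBestStep] at hstep
                split at hstep <;> injection hstep with e <;> omega
              exact le_trans hwu (hold u hstep)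

-- ===== VERDICT (by name: the statement is the Claim_ definition above) =====
theorem map_height_to_resolution_spec : Claim_equal_map_height_to_resolution := by
  intro height resolutions _
  unfold Spec_map_height_to_resolution
  rcases resolutions with _ | ⟨r0, rest⟩
  · simp [map_height_to_resolution, map_height_to_resolution_alt]
  have hlne : (r0 :: rest : List Int) ≠ [] := by simp
  set s : List Int := PySem.List.sorted (r0 :: rest) (fun x => x) false with hs
  have hsperm : s.Perm (r0 :: rest) := PySem.List.sorted_perm ..
  have hsp : s.Pairwise (· ≤ ·) := by
    simpa using PySem.List.sorted_pairwise (xs := r0 :: rest) (key := fun x => x)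
  have hsne : s ≠ [] := by
    rw [hs, Ne, PySem.List.sorted_eq_nil_iff]
    simp
  rcases height with _ | h
  · -- height = None : last of sorted = max
    simp only [map_height_to_resolution, map_height_to_resolution_alt, if_neg hlne]
    rw [← hs, PySem.List.pyGet?_neg_one]
    have hmax : PySem.List.max? (r0 :: rest) (fun x => x) = some (rest.foldl max r0) :=
      PySem.List.max?_id_cons ..
    rw [hmax]
    rcases hlast : s.getLast? with _ | m
    · exact absurd (List.getLast?_eq_none_iff.mp hlast) hsne
    have hm_mem : m ∈ (r0 :: rest : List Int) := hsperm.mem_iff.mp (List.mem_of_getLast? hlast)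
    have hmx_mem : rest.foldl max r0 ∈ (r0 :: rest : List Int) := PySem.List.max?_mem hmax
    have h1 : m ≤ rest.foldl max r0 := by
      simpa using PySem.List.max?_isMax hmax m hm_mem
    have h2 : rest.foldl max r0 ≤ m :=
      pvLast_is_max s m hsp hlast _ (hsperm.mem_iff.mpr hmx_mem)
    rw [le_antisymm h1 h2]
  · -- height = some h
    simp only [map_height_to_resolution, map_height_to_resolution_alt, if_neg hlne]
    rw [← hs, pvFold_split]
    obtain ⟨hFn, hFs⟩ := pvBest_spec h (r0 :: rest) none (by intro w hw; cases hw)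
    set cand : List Int := s.filter (fun r => decide (r ≤ h)) with hc
    have hcand_pair : cand.Pairwise (· ≤ ·) := hsp.sublist List.filter_sublist
    have hcand_mem : ∀ y, y ∈ cand ↔ (y ∈ (r0 :: rest : List Int) ∧ y ≤ h) := by
      intro y
      rw [hc, List.mem_filter, hsperm.mem_iff]
      simp
    rcases hbest : (r0 :: rest).foldl (pvBestStep h) none with _ | v
    · -- no element ≤ h : candidates empty, B returns the running min
      obtain ⟨-, hnone⟩ := hFn hbest
      have hcnil : cand = [] := by
        rcases hx : cand with _ | ⟨c, cs⟩
        · rfl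
        · have : c ∈ cand := by rw [hx]; exact List.mem_cons_self ..
          obtain ⟨hcl, hch⟩ := (hcand_mem c).mp this
          exact absurd hch (hnone c hcl)
      rw [if_neg (by simp [hcnil])]
      have hmin : PySem.List.min? (r0 :: rest) (fun x => x) = some (rest.foldl min r0) :=
        PySem.List.min?_id_cons ..
      have hlofold : (r0 :: rest).foldl min r0 = rest.foldl min r0 := by
        simp [min_self]
      rcases hshead : s with _ | ⟨m, t⟩
      · exact absurd hshead hsne
      have hshead' : PySem.List.sorted (r0 :: rest) (fun x => x) false = m :: t := by
        rw [← hs]; exact hshead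
      have hm_min : ∀ y ∈ (r0 :: rest : List Int), m ≤ y := by
        intro y hy
        simpa using PySem.List.key_head_sorted_le _ _ hshead' y hy
      have hmn_mem : rest.foldl min r0 ∈ (r0 :: rest : List Int) := PySem.List.min?_mem hmin
      have hmn_min : ∀ y ∈ (r0 :: rest : List Int), rest.foldl min r0 ≤ y := by
        intro y hy
        simpa using PySem.List.min?_isMin hmin y hy
      have hm_mem : m ∈ (r0 :: rest : List Int) :=
        hsperm.mem_iff.mp (hshead ▸ List.mem_cons_self ..)
      have hme : m = rest.foldl min r0 :=
        le_antisymm (hm_min _ hmn_mem) (hmn_min _ hm_mem)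
      simp [hme, hlofold]
    · -- some element ≤ h : candidates nonempty, both return the max candidate
      obtain ⟨hmem, hvh, hub, -⟩ := hFs v hbest
      have hv_mem : v ∈ (r0 :: rest : List Int) := by
        rcases hmem with h0 | h0
        · cases h0
        · exact h0
      have hv_cand : v ∈ cand := (hcand_mem v).mpr ⟨hv_mem, hvh⟩
      have hcne : cand ≠ [] := by intro h0; rw [h0] at hv_cand; cases hv_cand
      rw [if_pos (by simpa using hcne), PySem.List.pyGet?_neg_one]
      rcases hlast : cand.getLast? with _ | m
      · exact absurd (List.getLast?_eq_none_iff.mp hlast) hcne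
      have hm_cand : m ∈ cand := List.mem_of_getLast? hlast
      obtain ⟨hml, hmh⟩ := (hcand_mem m).mp hm_cand
      have h1 : m ≤ v := hub m hml hmh
      have h2 : v ≤ m := pvLast_is_max cand m hcand_pair hlast v hv_cand
      rw [le_antisymm h1 h2]
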